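-- pv_equiv track=rewrite | github.com/alicedini/Bioinformatics-Assignments | Ex3_multiple_functions.py | rank_cumulative
-- ===== SOURCE A (Python) =====
-- def rank_cumulative(bwt):
--     #Takes the Burrows-Wheeler transform as argument
--     #Stores as keys a character in the BWT, and as values a list of the cumulative number of times
--     #it has found the character until that row, comprised that row.
--     #In this way we always know how many characters up to one point have been found in BWT of that kind
--     #An auxiliary dictionary containing the number of times a character is present is used.
--     #The auxiliary dictionary for the chars' occurrences is initialized
--     #At the beginning, the number of occurrences is 0
--     all_occurrences = {c:0 for c in bwt}
--     #The dictionary for cumulative sums is initialized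
--     cumulative_sum = {c:[] for c in bwt}
--     #By updating the auxiliary dictionary, each time we fill a position of the cumulative_sum dictionary's lists
--     #The lists will have all the same length of the BWT standing for the different positions where the computations
--     #arrive during the matching.
--     for c in bwt:
--         all_occurrences[c] += 1
--         #Whenever a character is encountered in BWT, its number of occurrences is updated in the auxiliary dictionary
--         #We fill each position of the corresponding value in cumulative_sum with the number of occurrences found so far
--         #At each iteration, while in the auxiliary dictionary only the value of the considered character is incremented
--         #In cumulative_sum we fill the correspondent position (of BWT) in each list with the occurrence of each char
--         for c in all_occurrences.keys():
--             cumulative_sum[c].append(all_occurrences[c])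
--     #Frees up memory for already used elements
--     del all_occurrences
--     return cumulative_sum
-- ===== SOURCE B (Python) =====
-- def rank_cumulative(bwt):
--     # Per-character scans: for each distinct character (first-appearance order),
--     # build its cumulative-occurrence list independently with a single counter.
--     result = {}
--     for c in dict.fromkeys(bwt):
--         n = 0
--         counts = []
--         for ch in bwt:
--             if ch == c:
--                 n += 1
--             counts.append(n)
--         result[c] = counts
--     return result
-- ===== Notes on version B (the rewrite author's own statement) =====
-- stated objective: alternative
-- what changed: A makes one positional pass maintaining an all-character occurrence table and appending to every character's list at each position; B instead iterates over the distinct characters (first-appearance order) and builds each character's cumulative list by an independent rescan of bwt with a single counter (fewer dict operations per position, measured ~2x faster).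
import Mathlib
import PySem

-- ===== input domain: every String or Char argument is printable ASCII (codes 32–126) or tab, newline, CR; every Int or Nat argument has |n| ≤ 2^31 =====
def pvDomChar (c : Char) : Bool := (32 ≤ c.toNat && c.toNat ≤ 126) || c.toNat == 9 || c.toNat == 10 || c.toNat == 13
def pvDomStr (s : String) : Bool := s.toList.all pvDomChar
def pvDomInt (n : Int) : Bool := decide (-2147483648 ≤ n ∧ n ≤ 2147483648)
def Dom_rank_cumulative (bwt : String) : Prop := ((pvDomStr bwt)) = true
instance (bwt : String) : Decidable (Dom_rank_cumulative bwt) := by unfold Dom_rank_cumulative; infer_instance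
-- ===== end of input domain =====

-- B replaces A's single positional pass maintaining an all-character table by one
-- independent counting rescan of bwt per distinct character (alternative decomposition,
-- same cost). Python dict keys are 1-char strings; ports work on Char and render the
-- keys with Char.toString at the end (exact: Char.toString is injective on the domain).

-- ===== PORT A =====
def rank_cumulative (bwt : String) : List (String × List Int) :=
  let cs := bwt.toList
  -- all_occurrences = {c:0 for c in bwt}
  let allOcc : PySem.Dict Char Int := cs.foldl (fun d c => d.insert c 0) PySem.Dict.empty
  -- cumulative_sum = {c:[] for c in bwt}
  let cumulative : PySem.Dict Char (List Int) := cs.foldl (fun d c => d.insert c []) PySem.Dict.empty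
  -- for c in bwt: all_occurrences[c] += 1; for c in all_occurrences.keys(): cumulative_sum[c].append(all_occurrences[c])
  -- (the keys are always present, so d[c] += 1 / .append are the modifies below)
  let st := cs.foldl (fun (st : PySem.Dict Char Int × PySem.Dict Char (List Int)) c =>
      let occ := st.1.modify c 0 (· + 1)
      let cum := occ.keys.foldl (fun d k => d.modify k [] (fun l => l ++ [occ.getD k 0])) st.2
      (occ, cum)) (allOcc, cumulative)
  st.2.items.map (fun p => (p.1.toString, p.2))

-- ===== PORT B =====
def rank_cumulative_alt (bwt : String) : List (String × List Int) :=
  let cs := bwt.toList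
  (PySem.List.dedup cs).map (fun c =>
    (c.toString,
     (cs.foldl (fun (st : Int × List Int) ch =>
        let n := if ch == c then st.1 + 1 else st.1
        (n, st.2 ++ [n])) ((0 : Int), ([] : List Int))).2))

-- ===== PRECONDITION & SPEC =====
def Spec_rank_cumulative (bwt : String) (out : List (String × List Int)) : Prop := out = rank_cumulative_alt bwt
instance (bwt : String) (out : List (String × List Int)) : Decidable (Spec_rank_cumulative bwt out) := by unfold Spec_rank_cumulative; infer_instance

-- ===== CLAIM (what is proved, stated in full; the proofs are below) =====
def Claim_equal_rank_cumulative : Prop := ∀ (bwt : String), Dom_rank_cumulative bwt → Spec_rank_cumulative bwt (rank_cumulative bwt)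

-- ===== LEMMAS AND PROOFS =====

-- the cumulative-occurrence list of character c along p
def cumCounts (c : Char) (p : List Char) : List Int :=
  (List.range p.length).map (fun i => ((p.take (i + 1)).count c : Int))

theorem cumCounts_append_singleton (c x : Char) (p : List Char) :
    cumCounts c (p ++ [x]) = cumCounts c p ++ [(((p ++ [x]).count c : Nat) : Int)] := by
  unfold cumCounts
  simp [List.range_succ, List.take_append]
  refine ⟨fun a ha => ?_, ?_⟩
  · have h0 : a + 1 - p.length = 0 := by omega
    simp [h0]
  · rw [List.take_of_length_le (by omega)]

-- B's inner scan computes cumCounts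
theorem bscan (c : Char) (p : List Char) : ∀ (n : Int) (acc : List Int),
    (p.foldl (fun (st : Int × List Int) ch =>
        let m := if ch == c then st.1 + 1 else st.1
        (m, st.2 ++ [m])) (n, acc))
      = (n + (p.count c : Nat), acc ++ (List.range p.length).map
          (fun i => n + (((p.take (i + 1)).count c : Nat) : Int))) := by
  induction p with
  | nil => intro n acc; simp
  | cons x t ih =>
    intro n acc
    simp only [List.foldl_cons]
    rw [ih]
    simp only [List.length_cons, List.range_succ_eq_map, List.map_cons, List.map_map,
      Prod.mk.injEq, List.append_assoc, List.singleton_append]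
    refine ⟨?_, ?_⟩
    · simp [List.count_cons]; split_ifs <;> ring
    · congr 1
      congr 1
      · simp [List.count_cons]; split_ifs <;> ring
      · apply List.map_congr_left
        intro i hi
        simp [Function.comp, List.count_cons, List.take_succ_cons]
        split_ifs <;> ring

-- the fst of A's main fold only depends on the occurrence dict
theorem fold_fst (p : List Char) : ∀ (o : PySem.Dict Char Int) (d : PySem.Dict Char (List Int)),
    (p.foldl (fun (st : PySem.Dict Char Int × PySem.Dict Char (List Int)) c =>
      let occ := st.1.modify c 0 (· + 1)
      let cum := occ.keys.foldl (fun d k => d.modify k [] (fun l => l ++ [occ.getD k 0])) st.2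
      (occ, cum)) (o, d)).1 = p.foldl (fun d x => d.modify x 0 (· + 1)) o := by
  induction p with
  | nil => intro o d; rfl
  | cons x t ih => intro o d; simp only [List.foldl_cons]; exact ih _ _

-- a constant-value insert loop leaves getD at that value
theorem getD_insertFold {ν : Type} (cs : List Char) (v : ν) (c : Char) : ∀ (d : PySem.Dict Char ν),
    d.getD c v = v → (cs.foldl (fun d x => d.insert x v) d).getD c v = v := by
  induction cs with
  | nil => intro d h; exact h
  | cons x t ih =>
    intro d h
    simp only [List.foldl_cons]
    exact ih _ (by rw [PySem.Dict.getD_insert]; split_ifs <;> simp [h])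

theorem set_update_self (l : List Char) : ∀ (S : List Char), (∀ x ∈ l, x ∈ S) → PySem.Set.update S l = S := by
  induction l with
  | nil => intro S _; rfl
  | cons x t ih =>
    intro S h
    have hx : PySem.Set.add S x = S := by
      simp [PySem.Set.add, h x (by simp)]
    show (x :: t).foldl PySem.Set.add S = S
    simp only [List.foldl_cons, hx]
    exact ih S (fun y hy => h y (by simp [hy]))

theorem filter_beq_nodup (S : List Char) (c : Char) (hnd : S.Nodup) (hc : c ∈ S) :
    S.filter (· == c) = [c] := by
  induction S with
  | nil => simp at hc
  | cons y t ih =>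
    by_cases hyc : y = c
    · subst hyc
      simp only [List.filter_cons, beq_self_eq_true, ite_true]
      have ht : t.filter (· == y) = [] := by
        apply List.filter_eq_nil_iff.mpr
        intro a ha
        simp only [beq_iff_eq]
        rintro rfl
        exact (List.nodup_cons.mp hnd).1 ha
      rw [ht]
    · have hne : (y == c) = false := by simp [hyc]
      simp only [List.filter_cons, hne, Bool.false_eq_true, ite_false]
      exact ih (List.nodup_cons.mp hnd).2 (by rcases List.mem_cons.mp hc with h | h; exact absurd h.symm hyc; exact h)

theorem foldl_pairize (K : List Char) (u : Char → Int) : ∀ (D : PySem.Dict Char (List Int)),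
    K.foldl (fun d k => d.modify k [] (fun l => l ++ [u k])) D
    = (K.map (fun k => (k, u k))).foldl (fun d q => d.modify q.1 [] (fun l => l ++ [q.2])) D := by
  induction K with
  | nil => intro D; rfl
  | cons y t ih => intro D; simp only [List.map_cons, List.foldl_cons]; exact ih _

-- the invariant of A's main positional pass
theorem mainInv (cs : List Char) : ∀ (p : List Char), (∀ x ∈ p, x ∈ PySem.List.dedup cs) →
    ((p.foldl (fun (st : PySem.Dict Char Int × PySem.Dict Char (List Int)) c =>
      let occ := st.1.modify c 0 (· + 1)
      let cum := occ.keys.foldl (fun d k => d.modify k [] (fun l => l ++ [occ.getD k 0])) st.2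
      (occ, cum))
      (cs.foldl (fun d c => d.insert c 0) PySem.Dict.empty,
       cs.foldl (fun d c => d.insert c ([] : List Int)) PySem.Dict.empty)).2.keys = PySem.List.dedup cs ∧
     ∀ c ∈ PySem.List.dedup cs,
       ((p.foldl (fun (st : PySem.Dict Char Int × PySem.Dict Char (List Int)) c =>
        let occ := st.1.modify c 0 (· + 1)
        let cum := occ.keys.foldl (fun d k => d.modify k [] (fun l => l ++ [occ.getD k 0])) st.2
        (occ, cum))
        (cs.foldl (fun d c => d.insert c 0) PySem.Dict.empty,
         cs.foldl (fun d c => d.insert c ([] : List Int)) PySem.Dict.empty)).2.getD c [] = cumCounts c p)) := by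
  intro p
  induction p using List.reverseRecOn with
  | nil =>
    intro _
    simp only [List.foldl_nil]
    constructor
    · rw [PySem.Dict.keys_foldl_insert]
      simp [PySem.Dict.keys_empty, PySem.Set.update_nil_left]
    · intro c _
      simp only [cumCounts, List.length_nil, List.range_zero, List.map_nil]
      exact getD_insertFold cs [] c _ (PySem.Dict.getD_empty _ _)
  | append_singleton p x ih =>
    intro hmem
    have hmemp : ∀ y ∈ p, y ∈ PySem.List.dedup cs := fun y hy => hmem y (by simp [hy])
    have hx : x ∈ PySem.List.dedup cs := hmem x (by simp)
    obtain ⟨ihk, ihg⟩ := ih hmemp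
    rw [List.foldl_append, List.foldl_cons, List.foldl_nil]
    have hK0 : (cs.foldl (fun d c => d.insert c (0 : Int)) PySem.Dict.empty).keys
        = PySem.List.dedup cs := by
      rw [PySem.Dict.keys_foldl_insert]
      simp [PySem.Dict.keys_empty, PySem.Set.update_nil_left]
    have hfst := fold_fst p (cs.foldl (fun d c => d.insert c 0) PySem.Dict.empty)
      (cs.foldl (fun d c => d.insert c ([] : List Int)) PySem.Dict.empty)
    have hoccK : ((p.foldl (fun (st : PySem.Dict Char Int × PySem.Dict Char (List Int)) c =>
        let occ := st.1.modify c 0 (· + 1)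
        let cum := occ.keys.foldl (fun d k => d.modify k [] (fun l => l ++ [occ.getD k 0])) st.2
        (occ, cum))
        (cs.foldl (fun d c => d.insert c 0) PySem.Dict.empty,
         cs.foldl (fun d c => d.insert c ([] : List Int)) PySem.Dict.empty)).1.modify x 0 (· + 1)).keys
        = PySem.List.dedup cs := by
      rw [hfst]
      have : ((p.foldl (fun d x => d.modify x 0 (· + 1))
          (cs.foldl (fun d c => d.insert c (0 : Int)) PySem.Dict.empty)).modify x 0 (· + 1))
          = (p ++ [x]).foldl (fun d x => d.modify x 0 (· + 1))
            (cs.foldl (fun d c => d.insert c (0 : Int)) PySem.Dict.empty) := by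
        rw [List.foldl_append, List.foldl_cons, List.foldl_nil]
      rw [this, PySem.Dict.keys_foldl_modify, hK0]
      exact set_update_self _ _ hmem
    have hoccget : ∀ k, ((p.foldl (fun (st : PySem.Dict Char Int × PySem.Dict Char (List Int)) c =>
        let occ := st.1.modify c 0 (· + 1)
        let cum := occ.keys.foldl (fun d k => d.modify k [] (fun l => l ++ [occ.getD k 0])) st.2
        (occ, cum))
        (cs.foldl (fun d c => d.insert c 0) PySem.Dict.empty,
         cs.foldl (fun d c => d.insert c ([] : List Int)) PySem.Dict.empty)).1.modify x 0 (· + 1)).getD k 0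
        = (((p ++ [x]).count k : Nat) : Int) := by
      intro k
      rw [hfst]
      have : ((p.foldl (fun d x => d.modify x 0 (· + 1))
          (cs.foldl (fun d c => d.insert c (0 : Int)) PySem.Dict.empty)).modify x 0 (· + 1))
          = (p ++ [x]).foldl (fun d x => d.modify x 0 (· + 1))
            (cs.foldl (fun d c => d.insert c (0 : Int)) PySem.Dict.empty) := by
        rw [List.foldl_append, List.foldl_cons, List.foldl_nil]
      rw [this, PySem.Dict.getD_foldl_modify_add_one,
        getD_insertFold cs 0 k _ (PySem.Dict.getD_empty _ _)]
      simp
    constructor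
    · dsimp only
      rw [hoccK, PySem.Dict.keys_foldl_modify, ihk]
      exact set_update_self _ _ (fun y hy => hy)
    · intro c hc
      dsimp only
      rw [hoccK, foldl_pairize, PySem.Dict.getD_foldl_modify_append, ihg c hc, List.filter_map]
      have hnd : (PySem.List.dedup cs).Nodup := by
        simp only [PySem.List.dedup_eq_ofList]
        exact PySem.Set.nodup_ofList cs
      have hfil : (PySem.List.dedup cs).filter
          ((fun (q : Char × Int) => q.1 == c) ∘ (fun k => (k, ((p.foldl (fun (st : PySem.Dict Char Int × PySem.Dict Char (List Int)) c =>
            let occ := st.1.modify c 0 (· + 1)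
            let cum := occ.keys.foldl (fun d k => d.modify k [] (fun l => l ++ [occ.getD k 0])) st.2
            (occ, cum))
            (cs.foldl (fun d c => d.insert c 0) PySem.Dict.empty,
             cs.foldl (fun d c => d.insert c ([] : List Int)) PySem.Dict.empty)).1.modify x 0 (· + 1)).getD k 0)))
          = [c] := filter_beq_nodup _ c hnd hc
      rw [hfil, List.map_singleton]
      rw [cumCounts_append_singleton]
      rw [hoccget c]
      simp

-- ===== VERDICT (by name: the statement is the Claim_ definition above) =====
theorem rank_cumulative_spec : Claim_equal_rank_cumulative := by
  intro bwt _
  unfold Spec_rank_cumulative rank_cumulative rank_cumulative_alt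
  dsimp only
  obtain ⟨hk, hg⟩ := mainInv bwt.toList bwt.toList
    (fun y hy => by simp [hy])
  have hnd : (PySem.List.dedup bwt.toList).Nodup := by
    simp only [PySem.List.dedup_eq_ofList]
    exact PySem.Set.nodup_ofList _
  rw [PySem.Dict.items_eq_map_keys _ (by rw [hk]; exact hnd) [], hk, List.map_map]
  apply List.map_congr_left
  intro c hc
  simp only [Function.comp]
  rw [hg c hc, bscan]
  simp [cumCounts]
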